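-- pv_equiv track=rewrite | github.com/PrakashPrabhu-M/CodingRedumption | Bit manipulation/Swap all the Odd and Even bits of an integer.py | swap_all_odd_and_even_bits
-- ===== SOURCE A (Python) =====
-- def swap_all_odd_and_even_bits(n):
--     i=3
--     s=n
--     while i>=0:
--         a=1 if (n&(1<<i)>0) else 0
--         b=1 if (n&(1<<(i-1))>0) else 0
--         if (a^b)>0:
--             s=s^(1<<i)
--             s=s^(1<<(i-1))
--         i-=2
--     return s
-- ===== SOURCE B (Python) =====
-- def swap_all_odd_and_even_bits(n):
--     return ((n & 0xA) >> 1) | ((n & 0x5) << 1) | (n & ~0xF)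
-- ===== Notes on version B (the rewrite author's own statement) =====
-- stated objective: idiomatic
-- what changed: Replaced A's loop over the low bit-pairs with conditional XOR swaps by a single closed-form bitmask expression that masks and shifts the odd-position low bits down and the even-position low bits up while preserving all higher bits.
import Mathlib
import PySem

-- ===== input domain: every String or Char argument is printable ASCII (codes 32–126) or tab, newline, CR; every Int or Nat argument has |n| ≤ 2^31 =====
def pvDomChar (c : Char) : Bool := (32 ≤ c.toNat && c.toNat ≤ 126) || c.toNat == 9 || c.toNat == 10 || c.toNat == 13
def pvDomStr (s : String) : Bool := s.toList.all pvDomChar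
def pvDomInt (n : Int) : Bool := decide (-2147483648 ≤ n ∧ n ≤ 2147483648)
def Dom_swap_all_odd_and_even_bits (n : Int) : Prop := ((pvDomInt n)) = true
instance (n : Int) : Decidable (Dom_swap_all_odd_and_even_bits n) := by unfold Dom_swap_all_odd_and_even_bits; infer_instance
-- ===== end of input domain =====

-- B replaces A's 2-iteration loop of conditional XOR swaps by the single closed-form
-- bitmask expression ((n & 0xA) >> 1) | ((n & 0x5) << 1) | (n & ~0xF).


-- ===== PORT A =====
-- the 'while i>=0' loop of A: i counts 3, 1, then stops; s is the accumulator
def swapLoop (n : Int) (i : Int) (s : Int) : Int :=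
  if _h : i ≥ 0 then
    let a : Int := if PySem.Int.band n ((1 : Int) <<< i.toNat) > 0 then 1 else 0
    let b : Int := if PySem.Int.band n ((1 : Int) <<< (i - 1).toNat) > 0 then 1 else 0
    let s' : Int :=
      if PySem.Int.bxor a b > 0 then
        PySem.Int.bxor (PySem.Int.bxor s ((1 : Int) <<< i.toNat)) ((1 : Int) <<< (i - 1).toNat)
      else s
    swapLoop n (i - 2) s'
  else s
termination_by (i + 2).toNat
decreasing_by omega

def swap_all_odd_and_even_bits (n : Int) : Int := swapLoop n 3 n

-- ===== PORT B =====
def swap_all_odd_and_even_bits_alt (n : Int) : Int :=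
  PySem.Int.bor
    (PySem.Int.bor ((PySem.Int.band n 0xA) >>> (1 : Nat)) ((PySem.Int.band n 0x5) <<< (1 : Nat)))
    (PySem.Int.band n (Int.not 0xF))

-- ===== PRECONDITION & SPEC =====
def Spec_swap_all_odd_and_even_bits (n : Int) (out : Int) : Prop := out = swap_all_odd_and_even_bits_alt n
instance (n : Int) (out : Int) : Decidable (Spec_swap_all_odd_and_even_bits n out) := by unfold Spec_swap_all_odd_and_even_bits; infer_instance

-- ===== CLAIM (what is proved, stated in full; the proofs are below) =====
def Claim_equal_swap_all_odd_and_even_bits : Prop := ∀ (n : Int), Dom_swap_all_odd_and_even_bits n → Spec_swap_all_odd_and_even_bits n (swap_all_odd_and_even_bits n)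

-- ===== LEMMAS AND PROOFS =====

theorem band_ofNat (m c : ℕ) : PySem.Int.band (Int.ofNat m) (Int.ofNat c) = Int.ofNat (m &&& c) := by
  simp [PySem.Int.band]
theorem band_negSucc_ofNat (m c : ℕ) : PySem.Int.band (Int.negSucc m) (Int.ofNat c) = Int.ofNat (c - (c &&& m)) := by
  simp [PySem.Int.band, Int.negSucc_eq]; try omega
theorem band_ofNat_negSucc (m k : ℕ) : PySem.Int.band (Int.ofNat m) (Int.negSucc k) = Int.ofNat (m - (m &&& k)) := by
  simp [PySem.Int.band, Int.negSucc_eq]; try omega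
theorem band_negSucc_negSucc (m k : ℕ) : PySem.Int.band (Int.negSucc m) (Int.negSucc k) = Int.negSucc (m ||| k) := by
  simp [PySem.Int.band, Int.negSucc_eq]; try omega
theorem bxor_negSucc_ofNat (m c : ℕ) : PySem.Int.bxor (Int.negSucc m) (Int.ofNat c) = Int.negSucc (m ^^^ c) := by
  simp [PySem.Int.bxor, Int.negSucc_eq]; try omega
theorem bor_ofNat (m c : ℕ) : PySem.Int.bor (Int.ofNat m) (Int.ofNat c) = Int.ofNat (m ||| c) := by
  simp [PySem.Int.bor]
theorem bor_ofNat_negSucc (m k : ℕ) : PySem.Int.bor (Int.ofNat m) (Int.negSucc k) = Int.negSucc (k - (k &&& m)) := by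
  simp [PySem.Int.bor, Int.negSucc_eq]; try omega
theorem ldiff_add_and (a b : ℕ) : a.ldiff b + (a &&& b) = a := by
  induction a using Nat.binaryRec generalizing b with
  | zero => simp [Nat.ldiff]
  | bit b' a' ih =>
    rw [← Nat.bit_testBit_zero_shiftRight_one b, Nat.ldiff_bit, Nat.land_bit]
    have h := ih (b >>> 1)
    cases b' <;> cases b.testBit 0 <;> simp [Nat.bit_val] <;> omega
theorem sub_and_eq_ldiff (a b : ℕ) : a - (a &&& b) = a.ldiff b := by
  have h := ldiff_add_and a b
  omega
theorem and8 (m : ℕ) : m &&& 8 = (m.testBit 3).toNat * 8 := by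
  have h := Nat.and_two_pow m 3; norm_num at h; exact h
theorem and4 (m : ℕ) : m &&& 4 = (m.testBit 2).toNat * 4 := by
  have h := Nat.and_two_pow m 2; norm_num at h; exact h
theorem and2 (m : ℕ) : m &&& 2 = (m.testBit 1).toNat * 2 := by
  have h := Nat.and_two_pow m 1; norm_num at h; exact h
theorem and1 (m : ℕ) : m &&& 1 = (m.testBit 0).toNat := by
  have h := Nat.and_two_pow m 0
  simpa [Nat.testBit, Nat.and_one_is_mod] using h
theorem A_unfold (n : Int) : swap_all_odd_and_even_bits n =
    (let s1 := if PySem.Int.bxor (if PySem.Int.band n 8 > 0 then (1:Int) else 0)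
                   (if PySem.Int.band n 4 > 0 then (1:Int) else 0) > 0
               then PySem.Int.bxor (PySem.Int.bxor n 8) 4 else n
     if PySem.Int.bxor (if PySem.Int.band n 2 > 0 then (1:Int) else 0)
         (if PySem.Int.band n 1 > 0 then (1:Int) else 0) > 0
     then PySem.Int.bxor (PySem.Int.bxor s1 2) 1 else s1) := by
  simp only [swap_all_odd_and_even_bits]
  rw [swapLoop, swapLoop, swapLoop]
  norm_num [show (1:Int) <<< Int.toNat 3 = 8 by decide, show (1:Int) <<< Int.toNat 2 = 4 by decide,
    show (1:Int) <<< (1:Nat) = 2 by decide, show (1:Int) <<< Int.toNat 1 = 2 by decide]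
theorem ofNat_pos' (k : ℕ) : 0 < Int.ofNat k ↔ 0 < k := Int.natCast_pos
theorem main_ofNat (m : ℕ) : swap_all_odd_and_even_bits (Int.ofNat m) =
    Int.ofNat ((((m &&& 10) >>> 1) ||| ((m &&& 5) <<< 1)) ||| m.ldiff 15) := by
  rw [A_unfold]
  simp only [show ((8:Int)) = Int.ofNat 8 from rfl, show ((4:Int)) = Int.ofNat 4 from rfl,
    show ((2:Int)) = Int.ofNat 2 from rfl, show ((1:Int)) = Int.ofNat 1 from rfl,
    band_ofNat, gt_iff_lt, ofNat_pos', and8, and4, and2, and1]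
  cases h3 : m.testBit 3 <;> cases h2 : m.testBit 2 <;>
    cases h1 : m.testBit 1 <;> cases h0 : m.testBit 0 <;>
  · simp only [h3, h2, h1, h0, Bool.toNat_true, Bool.toNat_false]
    norm_num [show PySem.Int.bxor (1:Int) (0:Int) = 1 by decide,
      show PySem.Int.bxor (0:Int) (1:Int) = 1 by decide,
      show PySem.Int.bxor (1:Int) (1:Int) = 0 by decide,
      show PySem.Int.bxor (0:Int) (0:Int) = 0 by decide]
    try simp only [show (8:Int) = ((8:ℕ):Int) from rfl, show (4:Int) = ((4:ℕ):Int) from rfl,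
       show (2:Int) = ((2:ℕ):Int) from rfl, show (1:Int) = ((1:ℕ):Int) from rfl,
       PySem.Int.bxor_natCast, Nat.cast_inj, Int.ofNat_eq_natCast]
    apply Nat.eq_of_testBit_eq
    intro j
    simp only [Nat.testBit_succ, Nat.testBit_zero] at h3 h2 h1 h0
    rcases j with _|_|_|_|j <;>
    · simp only [Nat.testBit_shiftRight, Nat.testBit_shiftLeft, Nat.testBit_xor, Nat.testBit_or,
        Nat.testBit_and, Nat.testBit_ldiff]
      simp [Nat.testBit_succ, Nat.testBit_zero, Nat.zero_testBit, h3, h2, h1, h0, Nat.add_comm 1]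
theorem and8' (m : ℕ) : 8 &&& m = (m.testBit 3).toNat * 8 := by rw [Nat.and_comm]; exact and8 m
theorem and4' (m : ℕ) : 4 &&& m = (m.testBit 2).toNat * 4 := by rw [Nat.and_comm]; exact and4 m
theorem and2' (m : ℕ) : 2 &&& m = (m.testBit 1).toNat * 2 := by rw [Nat.and_comm]; exact and2 m
theorem and1' (m : ℕ) : 1 &&& m = (m.testBit 0).toNat := by rw [Nat.and_comm]; exact and1 m
theorem main_negSucc (m : ℕ) : swap_all_odd_and_even_bits (Int.negSucc m) =
    Int.negSucc (Nat.ldiff (m ||| 15) (((Nat.ldiff 10 m) >>> 1) ||| ((Nat.ldiff 5 m) <<< 1))) := by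
  rw [A_unfold]
  simp only [show ((8:Int)) = Int.ofNat 8 from rfl, show ((4:Int)) = Int.ofNat 4 from rfl,
    show ((2:Int)) = Int.ofNat 2 from rfl, show ((1:Int)) = Int.ofNat 1 from rfl,
    band_negSucc_ofNat, gt_iff_lt, ofNat_pos', and8', and4', and2', and1']
  cases h3 : m.testBit 3 <;> cases h2 : m.testBit 2 <;>
    cases h1 : m.testBit 1 <;> cases h0 : m.testBit 0 <;>
  · simp only [h3, h2, h1, h0, Bool.toNat_true, Bool.toNat_false]
    norm_num [show PySem.Int.bxor (1:Int) (0:Int) = 1 by decide,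
      show PySem.Int.bxor (0:Int) (1:Int) = 1 by decide,
      show PySem.Int.bxor (1:Int) (1:Int) = 0 by decide,
      show PySem.Int.bxor (0:Int) (0:Int) = 0 by decide]
    try simp only [show (8:Int) = Int.ofNat 8 from rfl, show (4:Int) = Int.ofNat 4 from rfl,
      show (2:Int) = Int.ofNat 2 from rfl, show (1:Int) = Int.ofNat 1 from rfl,
      bxor_negSucc_ofNat, Int.negSucc.injEq]
    apply Nat.eq_of_testBit_eq
    intro j
    simp only [Nat.testBit_succ, Nat.testBit_zero] at h3 h2 h1 h0
    rcases j with _|_|_|_|j <;>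
    · simp only [Nat.testBit_shiftRight, Nat.testBit_shiftLeft, Nat.testBit_xor, Nat.testBit_or,
        Nat.testBit_and, Nat.testBit_ldiff]
      simp [Nat.testBit_succ, Nat.testBit_zero, Nat.zero_testBit, h3, h2, h1, h0, Nat.add_comm 1]

theorem alt_ofNat (m : ℕ) : swap_all_odd_and_even_bits_alt (Int.ofNat m)
    = Int.ofNat ((((m &&& 10) >>> 1) ||| ((m &&& 5) <<< 1)) ||| m.ldiff 15) := by
  unfold swap_all_odd_and_even_bits_alt
  rw [show ((0xA : Int)) = Int.ofNat 10 from rfl, show ((0x5 : Int)) = Int.ofNat 5 from rfl,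
      show (Int.not 0xF) = Int.negSucc 15 from rfl]
  rw [band_ofNat, band_ofNat, band_ofNat_negSucc, sub_and_eq_ldiff]
  rfl

theorem alt_negSucc (m : ℕ) : swap_all_odd_and_even_bits_alt (Int.negSucc m)
    = Int.negSucc (Nat.ldiff (m ||| 15) (((Nat.ldiff 10 m) >>> 1) ||| ((Nat.ldiff 5 m) <<< 1))) := by
  unfold swap_all_odd_and_even_bits_alt
  rw [show ((0xA : Int)) = Int.ofNat 10 from rfl, show ((0x5 : Int)) = Int.ofNat 5 from rfl,
      show (Int.not 0xF) = Int.negSucc 15 from rfl]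
  rw [band_negSucc_ofNat, band_negSucc_ofNat, band_negSucc_negSucc, sub_and_eq_ldiff, sub_and_eq_ldiff]
  rw [show (Int.ofNat (Nat.ldiff 10 m)) >>> (1:Nat) = Int.ofNat ((Nat.ldiff 10 m) >>> 1) from rfl,
      show (Int.ofNat (Nat.ldiff 5 m)) <<< (1:Nat) = Int.ofNat ((Nat.ldiff 5 m) <<< 1) from rfl,
      bor_ofNat, bor_ofNat_negSucc, sub_and_eq_ldiff]

theorem main_eq (n : Int) : swap_all_odd_and_even_bits n = swap_all_odd_and_even_bits_alt n := by
  rcases n with m | m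
  · rw [main_ofNat, alt_ofNat]
  · rw [main_negSucc, alt_negSucc]

-- ===== VERDICT (by name: the statement is the Claim_ definition above) =====
theorem swap_all_odd_and_even_bits_spec : Claim_equal_swap_all_odd_and_even_bits := by
  intro n _
  exact main_eq n
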